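-- pv_equiv track=rewrite | github.com/deqiankong/SPI | main.py | rewrite_logs
-- ===== SOURCE A (Python) =====
-- def rewrite_logs(d):
--     new_d = {}
--     eval_unseen_prefix = "eval_unseen_"
--     eval_unseen_prefix_len = len(eval_unseen_prefix)
--     eval_prefix = "eval_"
--     eval_prefix_len = len(eval_prefix)
--     test_unseen_prefix = "test_unseen_"
--     test_unseen_prefix_len = len(test_unseen_prefix)
--     test_prefix = "test_"
--     test_prefix_len = len(test_prefix)
--     for k, v in d.items():
--         if k.startswith(eval_unseen_prefix):
--             new_d["eval_unseen/" + k[eval_unseen_prefix_len:]] = v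
--         elif k.startswith(eval_prefix):
--             new_d["eval/" + k[eval_prefix_len:]] = v
--         elif k.startswith(test_unseen_prefix):
--             new_d["test_unseen/" + k[test_unseen_prefix_len:]] = v
--         elif k.startswith(test_prefix):
--             new_d["test/" + k[test_prefix_len:]] = v
--         else:
--             new_d["train/" + k] = v
--     return new_d
-- ===== SOURCE B (Python) =====
-- def _route(k):
--     head, sep, tail = k.partition("_")
--     if sep and head in ("eval", "test"):
--         if tail.startswith("unseen_"):
--             return head + "_unseen/" + tail[len("unseen_"):]
--         return head + "/" + tail
--     return "train/" + k
--
--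
-- def rewrite_logs(d):
--     return {_route(k): v for k, v in d.items()}
-- ===== Notes on version B (the rewrite author's own statement) =====
-- stated objective: alternative
-- what changed: Instead of testing four hard-coded prefixes per key, B splits each key once at its first underscore (str.partition) and dispatches on the head token ('eval'/'test', optionally followed by an 'unseen_' tail) to rebuild the key, with 'train/' as default; the result dict is built by a comprehension over the routed keys.
import Mathlib
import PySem

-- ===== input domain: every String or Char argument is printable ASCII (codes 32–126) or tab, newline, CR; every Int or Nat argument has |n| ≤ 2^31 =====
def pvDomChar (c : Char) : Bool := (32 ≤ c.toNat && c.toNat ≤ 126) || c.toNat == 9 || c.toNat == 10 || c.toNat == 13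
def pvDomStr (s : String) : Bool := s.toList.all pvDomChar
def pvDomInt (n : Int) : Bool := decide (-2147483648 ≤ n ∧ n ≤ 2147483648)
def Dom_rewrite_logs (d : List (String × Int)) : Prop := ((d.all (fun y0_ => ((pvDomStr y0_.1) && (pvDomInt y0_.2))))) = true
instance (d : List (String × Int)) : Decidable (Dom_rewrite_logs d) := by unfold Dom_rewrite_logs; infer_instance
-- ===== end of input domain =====

-- B routes each key by splitting it once at its first underscore (str.partition) and dispatching
-- on the head token, instead of A's four hard-coded prefix tests; objective: alternative.

-- ===== PORT A =====
-- A: loop over d.items(), if/elif cascade on four literal prefixes, inserting into new_d.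
def rewrite_logs (d : List (String × Int)) : List (String × Int) :=
  (d.foldl (fun new_d p =>
      if PySem.Str.startswith p.1 "eval_unseen_" then
        new_d.insert ("eval_unseen/" ++ PySem.Str.slice p.1 (some 12) none) p.2
      else if PySem.Str.startswith p.1 "eval_" then
        new_d.insert ("eval/" ++ PySem.Str.slice p.1 (some 5) none) p.2
      else if PySem.Str.startswith p.1 "test_unseen_" then
        new_d.insert ("test_unseen/" ++ PySem.Str.slice p.1 (some 12) none) p.2
      else if PySem.Str.startswith p.1 "test_" then
        new_d.insert ("test/" ++ PySem.Str.slice p.1 (some 5) none) p.2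
      else
        new_d.insert ("train/" ++ p.1) p.2)
    PySem.Dict.empty).items

-- ===== PORT B =====
-- Hand port of str.partition("_") for the single-character separator "_" (PySem has no partition):
-- scans once for the first '_' and returns (text before it, whether one was found, text after it);
-- exact on every string.
def pvPartU : List Char → List Char × Bool × List Char
  | [] => ([], false, [])
  | c :: rest =>
      if c = '_' then ([], true, rest)
      else
        match pvPartU rest with
        | (h, f, t) => (c :: h, f, t)

-- B's _route helper: head, sep, tail = k.partition("_"); dispatch on the head token.
def pvRoute (k : String) : String :=
  match pvPartU k.toList with
  | (head, sep, tail) =>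
      if sep && (String.ofList head == "eval" || String.ofList head == "test") then
        if PySem.Chars.startswith tail "unseen_".toList then
          String.ofList head ++ "_unseen/" ++ String.ofList (PySem.Chars.slice tail (some 7) none)
        else
          String.ofList head ++ "/" ++ String.ofList tail
      else
        "train/" ++ k

def rewrite_logs_alt (d : List (String × Int)) : List (String × Int) :=
  (PySem.Dict.ofList (d.map (fun p => (pvRoute p.1, p.2)))).items

-- ===== PRECONDITION & SPEC =====
def Spec_rewrite_logs (d : List (String × Int)) (out : List (String × Int)) : Prop := out = rewrite_logs_alt d
instance (d : List (String × Int)) (out : List (String × Int)) : Decidable (Spec_rewrite_logs d out) := by unfold Spec_rewrite_logs; infer_instance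

-- ===== CLAIM (what is proved, stated in full; the proofs are below) =====
def Claim_equal_rewrite_logs : Prop := ∀ (d : List (String × Int)), Dom_rewrite_logs d → Spec_rewrite_logs d (rewrite_logs d)

-- ===== LEMMAS AND PROOFS =====

-- A's if/elif cascade as a named key function (proof helper only).
def pvKeyA (k : String) : String :=
  if PySem.Str.startswith k "eval_unseen_" then "eval_unseen/" ++ PySem.Str.slice k (some 12) none
  else if PySem.Str.startswith k "eval_" then "eval/" ++ PySem.Str.slice k (some 5) none
  else if PySem.Str.startswith k "test_unseen_" then "test_unseen/" ++ PySem.Str.slice k (some 12) none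
  else if PySem.Str.startswith k "test_" then "test/" ++ PySem.Str.slice k (some 5) none
  else "train/" ++ k

-- pvPartU either reports no underscore, or names the first one: cs = pre ++ '_' :: rest, '_' ∉ pre.
theorem pvPartU_spec (cs : List Char) :
    ('_' ∉ cs ∧ pvPartU cs = (cs, false, [])) ∨
    ∃ pre rest, cs = pre ++ '_' :: rest ∧ '_' ∉ pre ∧ pvPartU cs = (pre, true, rest) := by
  induction cs with
  | nil => exact Or.inl ⟨by simp, rfl⟩
  | cons c cs ih =>
      by_cases hc : c = '_'
      · exact Or.inr ⟨[], cs, by simp [hc], by simp, by simp [pvPartU, hc]⟩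
      · rcases ih with ⟨h, heq⟩ | ⟨p, r, hcs, hp, heq⟩
        · refine Or.inl ⟨?_, by simp [pvPartU, hc, heq]⟩
          intro hm
          rcases List.mem_cons.mp hm with h' | h'
          · exact hc h'.symm
          · exact h h'
        · refine Or.inr ⟨c :: p, r, by simp [hcs], ?_, by simp [pvPartU, hc, heq]⟩
          intro hm
          rcases List.mem_cons.mp hm with h' | h'
          · exact hc h'.symm
          · exact hp h'

-- determinism: on pre ++ '_' :: rest with no '_' in pre, pvPartU splits exactly there.
theorem pvPartU_of_shape (pre rest : List Char) (h : '_' ∉ pre) :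
    pvPartU (pre ++ '_' :: rest) = (pre, true, rest) := by
  induction pre with
  | nil => simp [pvPartU]
  | cons c cs ih =>
      simp only [List.mem_cons, not_or] at h
      simp [pvPartU, Ne.symm h.1, ih h.2]

theorem pvStrExt (s t : String) (h : s.toList = t.toList) : s = t := by
  have := congrArg String.ofList h
  simpa using this

theorem pvStartswith_iff (k p : String) :
    PySem.Str.startswith k p = true ↔ p.toList <+: k.toList := by
  simp [PySem.Chars.startswith_iff]

theorem pvSliceStr12 (k : String) : (PySem.Str.slice k (some 12) none).toList = k.toList.drop 12 := by
  rw [PySem.Str.toList_slice, PySem.Chars.slice_eq_listSlice,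
    show (12 : Int) = ((12 : Nat) : Int) from by norm_num, PySem.List.slice_from_natCast]

theorem pvSliceStr5 (k : String) : (PySem.Str.slice k (some 5) none).toList = k.toList.drop 5 := by
  rw [PySem.Str.toList_slice, PySem.Chars.slice_eq_listSlice,
    show (5 : Int) = ((5 : Nat) : Int) from by norm_num, PySem.List.slice_from_natCast]

theorem pvSliceChars7 (t : List Char) : PySem.Chars.slice t (some 7) none = t.drop 7 := by
  rw [PySem.Chars.slice_eq_listSlice,
    show (7 : Int) = ((7 : Nat) : Int) from by norm_num, PySem.List.slice_from_natCast]

-- a prefix test fails when the first characters already disagree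
theorem pvNotStart (k p : String) (c d : Char) (cp ck : List Char)
    (hp : p.toList = c :: cp) (hk : k.toList = d :: ck) (hcd : c ≠ d) :
    PySem.Str.startswith k p = false := by
  rw [Bool.eq_false_iff]
  intro h
  obtain ⟨r, hr⟩ := (pvStartswith_iff _ _).mp h
  rw [hp, hk] at hr
  simp only [List.cons_append, List.cons.injEq] at hr
  exact hcd hr.1

theorem key_eq (k : String) : pvKeyA k = pvRoute k := by
  have e12 : ("eval_unseen_".toList) = "eval".toList ++ '_' :: "unseen_".toList := by decide
  have t12 : ("test_unseen_".toList) = "test".toList ++ '_' :: "unseen_".toList := by decide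
  have e5 : ("eval_".toList) = "eval".toList ++ '_' :: ([] : List Char) := by decide
  have t5 : ("test_".toList) = "test".toList ++ '_' :: ([] : List Char) := by decide
  rcases pvPartU_spec k.toList with ⟨hno, heq⟩ | ⟨pre, rest, hcs, hpre, heq⟩
  · -- no underscore in the key: every prefix test fails, both sides give "train/" ++ k
    have h4 : ∀ p : String, '_' ∈ p.toList → PySem.Str.startswith k p = false := by
      intro p hp
      rw [Bool.eq_false_iff]
      intro h
      exact hno (((pvStartswith_iff k p).mp h).subset hp)
    simp only [pvKeyA, pvRoute, heq, h4 "eval_unseen_" (by decide), h4 "eval_" (by decide),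
      h4 "test_unseen_" (by decide), h4 "test_" (by decide)]
    simp
  · by_cases hpe : pre = "eval".toList
    · -- head token "eval"
      subst hpe
      have hev : PySem.Str.startswith k "eval_" = true :=
        (pvStartswith_iff _ _).mpr ⟨rest, by rw [e5, hcs]; simp⟩
      by_cases hu : PySem.Chars.startswith rest "unseen_".toList = true
      · obtain ⟨r, hrr⟩ := (PySem.Chars.startswith_iff _ _).mp hu
        have heu : PySem.Str.startswith k "eval_unseen_" = true := by
          refine (pvStartswith_iff _ _).mpr ⟨r, ?_⟩
          rw [e12, hcs, ← hrr]
          simp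
        apply pvStrExt
        simp only [pvKeyA, pvRoute, heq, heu, hu, if_true, String.ofList_toList,
          beq_self_eq_true, Bool.true_or, Bool.true_and, String.toList_append,
          pvSliceStr12, pvSliceChars7, String.toList_ofList]
        rw [hcs, ← hrr,
          show "eval".toList ++ '_' :: ("unseen_".toList ++ r)
              = ("eval".toList ++ '_' :: "unseen_".toList) ++ r from by simp,
          List.drop_left' (by decide), List.drop_left' (by decide),
          show "eval_unseen/".toList = "eval".toList ++ "_unseen/".toList from by decide,
          List.append_assoc]
      · have heu : PySem.Str.startswith k "eval_unseen_" = false := by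
          rw [Bool.eq_false_iff]
          intro h
          obtain ⟨r, hr⟩ := (pvStartswith_iff _ _).mp h
          rw [e12, hcs] at hr
          simp only [List.append_assoc, List.cons_append,
            List.append_cancel_left_eq, List.cons.injEq, true_and] at hr
          exact hu ((PySem.Chars.startswith_iff _ _).mpr ⟨r, hr⟩)
        apply pvStrExt
        simp only [pvKeyA, pvRoute, heq, heu, hev, hu, Bool.false_eq_true, if_false, if_true,
          String.ofList_toList, beq_self_eq_true, Bool.true_or, Bool.true_and,
          String.toList_append, pvSliceStr5, String.toList_ofList]
        rw [hcs,
          show "eval".toList ++ '_' :: rest = ("eval".toList ++ ['_']) ++ rest from by simp,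
          List.drop_left' (by decide),
          show "eval/".toList = "eval".toList ++ "/".toList from by decide,
          List.append_assoc]
    · by_cases hpt : pre = "test".toList
      · -- head token "test"
        subst hpt
        have hkt : k.toList = 't' :: ("est".toList ++ '_' :: rest) := by rw [hcs]; rfl
        have hA : PySem.Str.startswith k "eval_" = false :=
          pvNotStart k "eval_" 'e' 't' ['v', 'a', 'l', '_'] ("est".toList ++ '_' :: rest) (by decide) hkt (by decide)
        have hAU : PySem.Str.startswith k "eval_unseen_" = false :=
          pvNotStart k "eval_unseen_" 'e' 't' ['v', 'a', 'l', '_', 'u', 'n', 's', 'e', 'e', 'n', '_'] ("est".toList ++ '_' :: rest) (by decide) hkt (by decide)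
        have htv : PySem.Str.startswith k "test_" = true :=
          (pvStartswith_iff _ _).mpr ⟨rest, by rw [t5, hcs]; simp⟩
        by_cases hu : PySem.Chars.startswith rest "unseen_".toList = true
        · obtain ⟨r, hrr⟩ := (PySem.Chars.startswith_iff _ _).mp hu
          have htu : PySem.Str.startswith k "test_unseen_" = true := by
            refine (pvStartswith_iff _ _).mpr ⟨r, ?_⟩
            rw [t12, hcs, ← hrr]
            simp
          apply pvStrExt
          simp only [pvKeyA, pvRoute, heq, hAU, hA, htu, hu, Bool.false_eq_true, if_false,
            if_true, String.ofList_toList, beq_self_eq_true, Bool.or_true, Bool.true_and,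
            String.toList_append, pvSliceStr12, pvSliceChars7, String.toList_ofList]
          rw [hcs, ← hrr,
            show "test".toList ++ '_' :: ("unseen_".toList ++ r)
                = ("test".toList ++ '_' :: "unseen_".toList) ++ r from by simp,
            List.drop_left' (by decide), List.drop_left' (by decide),
            show "test_unseen/".toList = "test".toList ++ "_unseen/".toList from by decide,
            List.append_assoc]
        · have htu : PySem.Str.startswith k "test_unseen_" = false := by
            rw [Bool.eq_false_iff]
            intro h
            obtain ⟨r, hr⟩ := (pvStartswith_iff _ _).mp h
            rw [t12, hcs] at hr
            simp only [List.append_assoc, List.cons_append,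
              List.append_cancel_left_eq, List.cons.injEq, true_and] at hr
            exact hu ((PySem.Chars.startswith_iff _ _).mpr ⟨r, hr⟩)
          apply pvStrExt
          simp only [pvKeyA, pvRoute, heq, hAU, hA, htu, htv, hu, Bool.false_eq_true, if_false,
            if_true, String.ofList_toList, beq_self_eq_true, Bool.or_true, Bool.true_and,
            String.toList_append, pvSliceStr5, String.toList_ofList]
          rw [hcs,
            show "test".toList ++ '_' :: rest = ("test".toList ++ ['_']) ++ rest from by simp,
            List.drop_left' (by decide),
            show "test/".toList = "test".toList ++ "/".toList from by decide,
            List.append_assoc]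
      · -- head token neither "eval" nor "test": both sides give "train/" ++ k
        have hb1 : (String.ofList pre == "eval") = false := by
          rw [beq_eq_false_iff_ne]
          intro h
          apply hpe
          have := congrArg String.toList h
          simpa using this
        have hb2 : (String.ofList pre == "test") = false := by
          rw [beq_eq_false_iff_ne]
          intro h
          apply hpt
          have := congrArg String.toList h
          simpa using this
        have hA : PySem.Str.startswith k "eval_" = false := by
          rw [Bool.eq_false_iff]
          intro h
          obtain ⟨r, hr⟩ := (pvStartswith_iff _ _).mp h
          have h2 : pvPartU k.toList = ("eval".toList, true, r) := by
            rw [← hr, e5]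
            simp only [List.append_assoc, List.cons_append, List.nil_append]
            exact pvPartU_of_shape _ _ (by decide)
          rw [heq] at h2
          simp only [Prod.mk.injEq] at h2
          exact hpe h2.1
        have hT : PySem.Str.startswith k "test_" = false := by
          rw [Bool.eq_false_iff]
          intro h
          obtain ⟨r, hr⟩ := (pvStartswith_iff _ _).mp h
          have h2 : pvPartU k.toList = ("test".toList, true, r) := by
            rw [← hr, t5]
            simp only [List.append_assoc, List.cons_append, List.nil_append]
            exact pvPartU_of_shape _ _ (by decide)
          rw [heq] at h2
          simp only [Prod.mk.injEq] at h2
          exact hpt h2.1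
        have hAU : PySem.Str.startswith k "eval_unseen_" = false := by
          rw [Bool.eq_false_iff]
          intro h
          have h2 : PySem.Str.startswith k "eval_" = true :=
            (pvStartswith_iff _ _).mpr
              ((by decide : "eval_".toList <+: "eval_unseen_".toList).trans
                ((pvStartswith_iff _ _).mp h))
          rw [hA] at h2
          exact Bool.false_ne_true h2
        have hTU : PySem.Str.startswith k "test_unseen_" = false := by
          rw [Bool.eq_false_iff]
          intro h
          have h2 : PySem.Str.startswith k "test_" = true :=
            (pvStartswith_iff _ _).mpr
              ((by decide : "test_".toList <+: "test_unseen_".toList).trans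
                ((pvStartswith_iff _ _).mp h))
          rw [hT] at h2
          exact Bool.false_ne_true h2
        simp only [pvKeyA, pvRoute, heq, hAU, hA, hTU, hT, hb1, hb2]
        simp

theorem rewrite_logs_spec : Claim_equal_rewrite_logs := by
  intro d _
  show rewrite_logs d = rewrite_logs_alt d
  unfold rewrite_logs rewrite_logs_alt PySem.Dict.ofList PySem.Dict.update
  rw [List.foldl_map]
  congr 1
  apply PySem.List.foldl_congr_mem
  intro nd p _
  rw [← key_eq p.1]
  unfold pvKeyA
  split_ifs <;> rfl
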